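-- pv_equiv track=rewrite | github.com/SurajShivakumar/RagaIdentifier | src/feature_extraction/extract_notes.py | find_characteristic_phrases
-- ===== SOURCE A (Python) =====
-- from typing import List, Tuple, Dict, Optional
-- from collections import Counter
--
-- def find_characteristic_phrases(phrases: List[List[str]],
--                                min_frequency: int = 2) -> Dict[str, int]:
--     """
--     Find frequently occurring characteristic phrases
--
--     Args:
--         phrases: List of note phrases
--         min_frequency: Minimum occurrences to consider characteristic
--
--     Returns:
--         Dictionary of phrase -> frequency
--     """
--     # Convert phrases to strings for counting
--     phrase_strings = [' '.join(phrase) for phrase in phrases]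
--
--     # Count occurrences
--     phrase_counts = Counter(phrase_strings)
--
--     # Filter by minimum frequency
--     characteristic = {
--         phrase: count
--         for phrase, count in phrase_counts.items()
--         if count >= min_frequency
--     }
--
--     return dict(sorted(characteristic.items(),
--                       key=lambda x: x[1],
--                       reverse=True))
-- ===== SOURCE B (Python) =====
-- def find_characteristic_phrases(phrases, min_frequency=2):
--     # One manual counting pass, then a bucket (counting) sort by frequency
--     # instead of filter + comparison sort.
--     counts = {}
--     for phrase in phrases:
--         s = ' '.join(phrase)
--         counts[s] = counts.get(s, 0) + 1
--     buckets = {}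
--     maxc = 0
--     for s, c in counts.items():
--         if c >= min_frequency:
--             buckets.setdefault(c, []).append(s)
--             if c > maxc:
--                 maxc = c
--     lo = min_frequency if min_frequency > 1 else 1
--     result = {}
--     for c in reversed(range(lo, maxc + 1)):
--         for s in buckets.get(c, []):
--             result[s] = c
--     return result
-- ===== Notes on version B (the rewrite author's own statement) =====
-- stated objective: alternative
-- what changed: Replaces Counter + dict-comprehension filter + stable comparison sort with a single manual counting pass followed by a bucket (counting) sort: phrases are grouped by frequency and emitted from the maximum frequency down, preserving first-seen order within each bucket.
import Mathlib
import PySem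

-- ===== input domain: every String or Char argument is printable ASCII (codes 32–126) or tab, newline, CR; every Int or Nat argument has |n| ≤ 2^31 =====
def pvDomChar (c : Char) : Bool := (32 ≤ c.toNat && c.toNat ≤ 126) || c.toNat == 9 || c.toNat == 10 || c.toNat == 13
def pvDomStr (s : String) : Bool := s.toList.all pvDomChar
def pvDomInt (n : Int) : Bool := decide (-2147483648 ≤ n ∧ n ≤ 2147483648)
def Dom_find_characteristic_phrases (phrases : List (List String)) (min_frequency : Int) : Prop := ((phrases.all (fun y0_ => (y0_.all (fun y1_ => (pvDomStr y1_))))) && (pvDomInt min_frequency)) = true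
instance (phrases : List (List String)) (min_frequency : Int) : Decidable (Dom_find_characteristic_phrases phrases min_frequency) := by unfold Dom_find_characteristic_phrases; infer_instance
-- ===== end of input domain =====

-- B replaces A's filter + stable comparison sort by a bucket (counting) sort over frequencies; same return value, different algorithm.

-- ===== PORT A =====
def find_characteristic_phrases (phrases : List (List String)) (min_frequency : Int) : List (String × Int) :=
  let phrase_strings := phrases.map (fun phrase => PySem.Str.join " " phrase)
  let phrase_counts := PySem.Dict.counter phrase_strings
  -- dict comprehension over phrase_counts.items() (distinct keys): its assoc list is the filtered items list
  let characteristic := phrase_counts.items.filter (fun p => min_frequency ≤ p.2)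
  -- dict(sorted(..., key=lambda x: x[1], reverse=True)) over distinct keys: the sorted assoc list
  PySem.List.sorted characteristic (fun x => x.2) true

-- ===== PORT B =====
def find_characteristic_phrases_alt (phrases : List (List String)) (min_frequency : Int) : List (String × Int) :=
  let counts := phrases.foldl (fun d phrase =>
      let s := PySem.Str.join " " phrase
      d.insert s (d.getD s 0 + 1)) PySem.Dict.empty
  -- one pass over counts.items(): buckets.setdefault(c, []).append(s) is modify with default, maxc in the same pass
  let bm := counts.items.foldl (fun (bm : PySem.Dict Int (List String) × Int) p =>
      if min_frequency ≤ p.2 then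
        (bm.1.modify p.2 [] (fun b => b ++ [p.1]), if bm.2 < p.2 then p.2 else bm.2)
      else bm) (PySem.Dict.empty, 0)
  let lo := if 1 < min_frequency then min_frequency else 1
  -- result[s] = c over distinct keys: the assoc list appends (s, c)
  ((PySem.List.pyRange lo (bm.2 + 1)).reverse).foldl (fun res c =>
      (bm.1.getD c []).foldl (fun res s => res ++ [(s, c)]) res) []

-- ===== PRECONDITION & SPEC =====
def Spec_find_characteristic_phrases (phrases : List (List String)) (min_frequency : Int) (out : List (String × Int)) : Prop := out = find_characteristic_phrases_alt phrases min_frequency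
instance (phrases : List (List String)) (min_frequency : Int) (out : List (String × Int)) : Decidable (Spec_find_characteristic_phrases phrases min_frequency out) := by unfold Spec_find_characteristic_phrases; infer_instance

-- ===== CLAIM (what is proved, stated in full; the proofs are below) =====
def Claim_equal_find_characteristic_phrases : Prop := ∀ (phrases : List (List String)) (min_frequency : Int), Dom_find_characteristic_phrases phrases min_frequency → Spec_find_characteristic_phrases phrases min_frequency (find_characteristic_phrases phrases min_frequency)

-- ===== LEMMAS AND PROOFS =====

-- insertBy passes over a block it does not go before
theorem insertBy_skip {α : Type} (before : α → α → Bool) (x : α) (as bs : List α)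
    (h : ∀ a ∈ as, before x a = false) :
    PySem.List.insertBy before x (as ++ bs) = as ++ PySem.List.insertBy before x bs := by
  induction as with
  | nil => simp
  | cons a as ih =>
    simp only [List.cons_append, PySem.List.insertBy, h a (by simp)]
    simp only [Bool.false_eq_true, if_false, List.cons.injEq, true_and]
    exact ih (fun a ha => h a (by simp [ha]))

-- insertBy goes to the front of a block it goes before everywhere
theorem insertBy_front {α : Type} (before : α → α → Bool) (x : α) (bs : List α)
    (h : ∀ b ∈ bs, before x b = true) :
    PySem.List.insertBy before x bs = x :: bs := by
  cases bs with
  | nil => rfl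
  | cons b bs => simp [PySem.List.insertBy, h b (by simp)]

-- inserting into a descending bucket concatenation lands at the end of x's bucket
theorem insertBy_flatMap {α : Type} (key : α → Int) (x : α) (cs : List Int) (F : Int → List α)
    (hcs : cs.Pairwise (· > ·)) (hx : key x ∈ cs)
    (hF : ∀ c ∈ cs, ∀ y ∈ F c, key y = c) :
    PySem.List.insertBy (fun a b => decide (key b < key a)) x (cs.flatMap F) =
      cs.flatMap (fun c => F c ++ if key x = c then [x] else []) := by
  induction cs with
  | nil => cases hx
  | cons c cs ih =>
    have hgt : ∀ c' ∈ cs, c > c' := (List.pairwise_cons.mp hcs).1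
    have hcs' := (List.pairwise_cons.mp hcs).2
    by_cases hxc : key x = c
    · -- skip F c (keys equal), then go before everything in later buckets
      rw [List.flatMap_cons,
        insertBy_skip _ _ _ _ (fun a ha => by
          simp [hF c (by simp) a ha, hxc]),
        insertBy_front _ _ _ (fun b hb => by
          obtain ⟨c', hc', hb'⟩ := List.mem_flatMap.mp hb
          simp [hF c' (by simp [hc']) b hb', hxc]
          exact hgt c' hc')]
      have : ∀ c' ∈ cs, (F c' ++ if key x = c' then [x] else []) = F c' := by
        intro c' hc'
        have : key x ≠ c' := by have := hgt c' hc'; omega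
        simp [this]
      rw [List.flatMap_cons, List.flatMap_congr this]
      simp [hxc]
    · have hx' : key x ∈ cs := by cases List.mem_cons.mp hx with
        | inl h => exact absurd h hxc
        | inr h => exact h
      have hlt : key x < c := hgt _ hx'
      rw [List.flatMap_cons,
        insertBy_skip _ _ _ _ (fun a ha => by
          simp [hF c (by simp) a ha]; omega),
        ih hcs' hx' (fun c' hc' => hF c' (by simp [hc']))]
      simp [List.flatMap_cons, hxc]

-- a stable reverse sort by an Int key is the descending bucket concatenation
theorem sorted_rev_eq_flatMap_filter {α : Type} (key : α → Int) (cs : List Int)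
    (hcs : cs.Pairwise (· > ·)) :
    ∀ l : List α, (∀ p ∈ l, key p ∈ cs) →
      PySem.List.sorted l key true = cs.flatMap (fun c => l.filter (fun p => key p == c)) := by
  intro l
  induction l using List.reverseRecOn with
  | nil =>
    rw [PySem.List.sorted_rev_eq_foldl_insertBy]
    simp
  | append_singleton l x ih =>
    intro hl
    rw [PySem.List.sorted_rev_eq_foldl_insertBy, List.foldl_append, List.foldl_cons, List.foldl_nil,
      ← PySem.List.sorted_rev_eq_foldl_insertBy,
      ih (fun p hp => hl p (by simp [hp])),
      insertBy_flatMap key x cs _ hcs (hl x (by simp))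
        (fun c _ y hy => by simpa using (List.mem_filter.mp hy).2)]
    apply List.flatMap_congr
    intro c _
    by_cases hxc : key x = c <;> simp [hxc]

-- the running-max fold bounds every key and its start
theorem foldl_max_bound (l : List (String × Int)) (a : Int) :
    a ≤ l.foldl (fun m p => if m < p.2 then p.2 else m) a ∧
      ∀ p ∈ l, p.2 ≤ l.foldl (fun m p => if m < p.2 then p.2 else m) a := by
  induction l generalizing a with
  | nil => simp
  | cons q l ih =>
    have h := ih (if a < q.2 then q.2 else a)
    constructor
    · refine le_trans ?_ h.1
      split <;> omega
    · intro p hp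
      cases List.mem_cons.mp hp with
      | inl h' =>
        subst h'
        refine le_trans ?_ h.1
        split <;> omega
      | inr h' => exact h.2 p h'

-- the two ports agree
theorem find_eq_alt (phrases : List (List String)) (min_frequency : Int) :
    find_characteristic_phrases phrases min_frequency =
      find_characteristic_phrases_alt phrases min_frequency := by
  unfold find_characteristic_phrases find_characteristic_phrases_alt
  simp only []
  -- name the common data
  set xs := phrases.map (fun phrase => PySem.Str.join " " phrase) with hxs
  set L := (PySem.Dict.counter xs).items.filter (fun p => decide (min_frequency ≤ p.2)) with hL
  set lo : Int := if 1 < min_frequency then min_frequency else 1 with hlo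
  -- B's counting loop is Counter(xs)
  have hcounts : phrases.foldl (fun d phrase =>
      let s := PySem.Str.join " " phrase
      d.insert s (d.getD s 0 + 1)) PySem.Dict.empty = PySem.Dict.counter xs := by
    rw [← PySem.Dict.foldl_insert_getD_add_one_eq_counter, hxs, List.foldl_map]
  rw [hcounts]
  -- B's bucket/max loop splits into two folds over the filtered items L
  have hbm : (PySem.Dict.counter xs).items.foldl (fun (bm : PySem.Dict Int (List String) × Int) p =>
      if min_frequency ≤ p.2 then
        (bm.1.modify p.2 [] (fun b => b ++ [p.1]), if bm.2 < p.2 then p.2 else bm.2)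
      else bm) (PySem.Dict.empty, 0) =
      (L.foldl (fun d p => d.modify p.2 [] (fun b => b ++ [p.1])) PySem.Dict.empty,
       L.foldl (fun m p => if m < p.2 then p.2 else m) 0) := by
    rw [hL, List.foldl_filter, List.foldl_filter, ← PySem.List.foldl_prod_mk]
    apply PySem.List.foldl_congr_mem
    intro bm p _
    by_cases h : min_frequency ≤ p.2 <;> simp [h]
  rw [hbm]
  set maxc := L.foldl (fun m p => if m < p.2 then p.2 else m) 0 with hmaxc
  -- each bucket holds its frequency's phrases in first-seen order
  have hbucket : ∀ c : Int,
      (L.foldl (fun d p => d.modify p.2 [] (fun b => b ++ [p.1])) PySem.Dict.empty).getD c [] =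
        (L.filter (fun p => p.2 == c)).map (fun p => p.1) := by
    intro c
    have := PySem.Dict.getD_foldl_modify_append (L.map (fun p => (p.2, p.1)))
      (PySem.Dict.empty (κ := Int) (ν := List String)) c
    rw [List.foldl_map] at this
    simpa [List.filter_map, Function.comp_def] using this
  -- B's output loop is the bucket concatenation
  have hout : ∀ (cs : List Int),
      cs.foldl (fun res c =>
        ((L.foldl (fun d p => d.modify p.2 [] (fun b => b ++ [p.1])) PySem.Dict.empty).getD c []).foldl
          (fun res s => res ++ [(s, c)]) res) [] =
      cs.flatMap (fun c => L.filter (fun p => p.2 == c)) := by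
    intro cs
    have : ∀ (cs : List Int) (acc : List (String × Int)),
        cs.foldl (fun res c =>
          ((L.foldl (fun d p => d.modify p.2 [] (fun b => b ++ [p.1])) PySem.Dict.empty).getD c []).foldl
            (fun res s => res ++ [(s, c)]) res) acc =
        acc ++ cs.flatMap (fun c => L.filter (fun p => p.2 == c)) := by
      intro cs
      induction cs with
      | nil => simp
      | cons c cs ih =>
        intro acc
        rw [List.foldl_cons, ih, PySem.List.foldl_append_singleton_eq_map, hbucket c, List.flatMap_cons,
          List.append_assoc]
        congr 1
        congr 1
        have : ∀ p ∈ L.filter (fun p => p.2 == c), ((fun p => (p.1, c)) p : String × Int) = p := by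
          intro p hp
          have : p.2 = c := by simpa using (List.mem_filter.mp hp).2
          simp [← this]
        rw [List.map_map]
        simpa using List.map_congr_left this
    simpa using this cs []
  rw [hout]
  -- the descending frequency range covers every surviving count, strictly decreasing
  have hrange : (PySem.List.pyRange lo (maxc + 1)).reverse.Pairwise (· > ·) := by
    rw [List.pairwise_reverse]
    rw [PySem.List.pyRange_of_pos lo (maxc + 1) (by norm_num : (0:Int) < 1)]
    refine List.pairwise_map.mpr ?_
    exact List.pairwise_lt_range.imp (fun h => by omega)
  have hmem : ∀ p ∈ L, p.2 ∈ (PySem.List.pyRange lo (maxc + 1)).reverse := by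
    intro p hp
    have h1 : p ∈ (PySem.Dict.counter xs).items ∧ min_frequency ≤ p.2 := by
      have := List.mem_filter.mp hp
      exact ⟨this.1, by simpa using this.2⟩
    have hone : 1 ≤ p.2 := by
      have := h1.1
      rw [PySem.Dict.items_counter] at this
      obtain ⟨k, hk, hkp⟩ := List.mem_map.mp this
      have hkx : k ∈ xs := (PySem.Set.mem_ofList xs k).mp hk
      have : 0 < xs.count k := List.count_pos_iff.mpr hkx
      have : p.2 = (xs.count k : Int) := by rw [← hkp]
      omega
    have hmax : p.2 ≤ maxc := (foldl_max_bound L 0).2 p hp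
    rw [List.mem_reverse, PySem.List.mem_pyRange_one]
    constructor
    · rw [hlo]; split <;> omega
    · omega
  rw [sorted_rev_eq_flatMap_filter (fun p => p.2) _ hrange L hmem]

-- ===== VERDICT (by name: the statement is the Claim_ definition above) =====
theorem find_characteristic_phrases_spec : Claim_equal_find_characteristic_phrases := by
  intro phrases min_frequency _
  unfold Spec_find_characteristic_phrases
  exact find_eq_alt phrases min_frequency
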